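-- pv_equiv track=rewrite | github.com/MrBrantCode/unitest_baseline | mut_generate/mist_train_cf/cf_31125/solution.py | max_thieves_captured
-- ===== SOURCE A (Python) =====
-- def max_thieves_captured(distancia, individuos):
--     max_thieves = 0
--     n = len(individuos)
--     for i in range(n):
--         if individuos[i] == 'P':
--             start = max(0, i - distancia)
--             end = min(n, i + distancia + 1)
--             for j in range(start, end):
--                 if individuos[j] == 'L':
--                     max_thieves += 1
--                     individuos[j] = 'C'  # Mark the caught thief
--                     break
--     return max_thieves
-- ===== SOURCE B (Python) =====
-- def max_thieves_captured(distancia, individuos):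
--     # One pass over precomputed position lists instead of rescanning a window
--     # per police; A mutates individuos in place, B does not (return-value equivalence).
--     thieves = [i for i, c in enumerate(individuos) if c == 'L']
--     police = [i for i, c in enumerate(individuos) if c == 'P']
--     count = 0
--     t = 0
--     for p in police:
--         while t < len(thieves) and thieves[t] < p - distancia:
--             t += 1
--         if t < len(thieves) and thieves[t] <= p + distancia:
--             count += 1
--             t += 1
--     return count
-- ===== Notes on version B (the rewrite author's own statement) =====
-- stated objective: alternative
-- what changed: Replaces A's per-police rescan of a window of the mutated character list by a single pass over precomputed 'L'/'P' position lists with a monotone pointer into the thief list; B does not mutate individuos (A marks caught thieves in place), return values agree everywhere.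
import Mathlib
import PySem

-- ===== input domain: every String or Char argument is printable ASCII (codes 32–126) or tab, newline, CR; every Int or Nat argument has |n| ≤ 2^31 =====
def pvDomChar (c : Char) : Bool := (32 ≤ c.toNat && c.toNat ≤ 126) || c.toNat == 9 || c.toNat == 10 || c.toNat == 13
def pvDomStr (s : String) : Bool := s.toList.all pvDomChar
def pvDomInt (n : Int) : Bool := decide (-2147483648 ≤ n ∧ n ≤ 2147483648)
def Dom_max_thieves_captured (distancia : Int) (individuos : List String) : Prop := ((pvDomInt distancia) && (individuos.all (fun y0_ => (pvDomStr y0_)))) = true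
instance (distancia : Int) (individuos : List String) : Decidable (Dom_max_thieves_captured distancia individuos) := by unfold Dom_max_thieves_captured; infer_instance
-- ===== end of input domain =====

-- B replaces A's per-police window rescan of the mutated list by one pass over
-- precomputed 'L'/'P' position lists with an advancing pointer; A mutates
-- `individuos` in place (caught 'L' → 'C'), B does not — the equivalence proved
-- here is about the return value.

-- ===== PORT A =====
-- inner `for j in range(start, end): if individuos[j] == 'L': … break` : returns the first such j
def pvFindThief (xs : List String) (j stop : Int) : Option Int :=
  if h : j < stop then
    if PySem.List.pyGetD xs j "" = "L" then some j
    else pvFindThief xs (j + 1) stop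
  else none
termination_by (stop - j).toNat
decreasing_by omega

def pvStepA (d n : Int) (st : Int × List String) (i : Int) : Int × List String :=
  if PySem.List.pyGetD st.2 i "" = "P" then
    match pvFindThief st.2 (max 0 (i - d)) (min n (i + d + 1)) with
    | some j => (st.1 + 1, PySem.List.pySetD st.2 j "C")
    | none => st
  else st

def max_thieves_captured (distancia : Int) (individuos : List String) : Int :=
  let n : Int := individuos.length
  ((PySem.List.pyRange 0 n 1).foldl (pvStepA distancia n) (0, individuos)).1

-- ===== PORT B =====
-- [i for i, c in enumerate(individuos) if c == ch]
def pvPosB (ch : String) (xs : List String) : List Int :=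
  ((PySem.List.enumerate xs 0).filter (fun e => e.2 == ch)).map (fun e => e.1)

-- Source B's pointer `t` into `thieves` is ported as consuming the remaining suffix
def pvStepB (d : Int) (st : Int × List Int) (p : Int) : Int × List Int :=
  let q := st.2.dropWhile (fun t => decide (t < p - d))
  match q with
  | [] => (st.1, [])
  | t :: rest => if t ≤ p + d then (st.1 + 1, rest) else (st.1, t :: rest)

def max_thieves_captured_alt (distancia : Int) (individuos : List String) : Int :=
  let thieves := pvPosB "L" individuos
  let police := pvPosB "P" individuos
  (police.foldl (pvStepB distancia) (0, thieves)).1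

-- ===== PRECONDITION & SPEC =====
def Spec_max_thieves_captured (distancia : Int) (individuos : List String) (out : Int) : Prop := out = max_thieves_captured_alt distancia individuos
instance (distancia : Int) (individuos : List String) (out : Int) : Decidable (Spec_max_thieves_captured distancia individuos out) := by unfold Spec_max_thieves_captured; infer_instance

-- ===== CLAIM (what is proved, stated in full; the proofs are below) =====
def Claim_equal_max_thieves_captured : Prop := ∀ (distancia : Int) (individuos : List String), Dom_max_thieves_captured distancia individuos → Spec_max_thieves_captured distancia individuos (max_thieves_captured distancia individuos)

-- ===== LEMMAS AND PROOFS =====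

lemma pvPosB_eq (ch : String) (xs : List String) :
    pvPosB ch xs
      = ((List.range xs.length).filter (fun j => xs.getD j "" == ch)).map (fun j => ((j : Nat) : Int)) := by
  unfold pvPosB
  rw [PySem.List.enumerate_eq_map_pyRange xs ""]
  rw [PySem.List.pyRange_one]
  simp only [sub_zero, Int.toNat_natCast, List.filter_map, List.map_map, PySem.List.len_eq]
  rw [List.filter_congr (q := fun j : Nat => xs.getD j "" == ch),
      List.map_congr_left (g := fun j : Nat => ((j : Nat) : Int))]
  · intro j hj
    simp [Function.comp]
  · intro j hj
    simp [Function.comp, PySem.List.pyGetD_natCast]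

lemma pvPosB_mem (ch : String) (xs : List String) (t : Int) :
    t ∈ pvPosB ch xs ↔ 0 ≤ t ∧ t < (xs.length : Int) ∧ xs.getD t.toNat "" = ch := by
  rw [pvPosB_eq]
  simp only [List.mem_map, List.mem_filter, List.mem_range, beq_iff_eq]
  constructor
  · rintro ⟨j, ⟨hj, hch⟩, rfl⟩
    refine ⟨by omega, by omega, by simpa using hch⟩
  · rintro ⟨h0, hlt, hch⟩
    exact ⟨t.toNat, ⟨by omega, hch⟩, by omega⟩

lemma pvPosB_pairwise (ch : String) (xs : List String) :
    (pvPosB ch xs).Pairwise (· < ·) := by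
  rw [pvPosB_eq]
  refine List.Pairwise.map _ (fun a b h => by exact_mod_cast h) ?_
  exact (List.pairwise_lt_range).filter _

lemma pvPosB_set_L (xs : List String) (k : Nat) (hk : k < xs.length)
    (hL : xs.getD k "" = "L") :
    pvPosB "L" (xs.set k "C") = (pvPosB "L" xs).filter (fun t => t ≠ ((k : Nat) : Int)) := by
  rw [pvPosB_eq, pvPosB_eq, List.length_set, List.filter_map]
  congr 1
  rw [List.filter_filter]
  apply List.filter_congr
  intro j hj
  simp only [List.mem_range] at hj
  by_cases hjk : j = k
  · subst hjk
    simp [List.getD_eq_getElem?_getD, List.getElem?_set_self, hj]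
  · have : (xs.set k "C").getD j "" = xs.getD j "" := by
      simp [List.getD_eq_getElem?_getD, List.getElem?_set_ne (by omega : k ≠ j)]
    simp only [this, Function.comp]
    have : (((j:Nat):Int) ≠ ((k:Nat):Int)) = True := by
      simp; omega
    simp [this, hjk]


lemma filter_ne_of_split {l pre post : List Int} {t : Int}
    (hl : l = pre ++ t :: post) (hnd : l.Nodup) :
    l.filter (fun x => x ≠ t) = pre ++ post := by
  subst hl
  rw [List.filter_append]
  rw [List.nodup_append] at hnd
  obtain ⟨h1, h2, h3⟩ := hnd
  rw [List.filter_cons]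
  simp only [ne_eq, not_true_eq_false, decide_false, Bool.false_eq_true, if_false]
  have hpre : ∀ x ∈ pre, x ≠ t := fun x hx =>
    h3 x hx t List.mem_cons_self
  have hpost : ∀ x ∈ post, x ≠ t := fun x hx => by
    intro h; subst h; exact (List.nodup_cons.1 h2).1 hx
  rw [List.filter_eq_self.2 (fun x hx => by simpa using hpre x hx),
      List.filter_eq_self.2 (fun x hx => by simpa using hpost x hx)]

lemma dropWhile_congr_mem {α : Type} (p q : α → Bool) (l : List α)
    (h : ∀ x ∈ l, p x = q x) : l.dropWhile p = l.dropWhile q := by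
  induction l with
  | nil => rfl
  | cons a t ih =>
    rw [List.dropWhile_cons, List.dropWhile_cons, h a List.mem_cons_self]
    split
    · exact ih (fun x hx => h x (List.mem_cons_of_mem a hx))
    · rfl

lemma filter_le_of_not_mem (i : Int) (l : List Int) (h : i ∉ l) :
    l.filter (fun x => decide (i ≤ x)) = l.filter (fun x => decide (i + 1 ≤ x)) := by
  apply List.filter_congr
  intro x hx
  have : x ≠ i := fun he => h (he ▸ hx)
  simp only [decide_eq_decide]
  omega

lemma filter_le_of_mem (i : Int) (l : List Int) (hp : l.Pairwise (· < ·)) (h : i ∈ l) :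
    l.filter (fun x => decide (i ≤ x)) = i :: l.filter (fun x => decide (i + 1 ≤ x)) := by
  induction l with
  | nil => cases h
  | cons a t ih =>
    rcases List.mem_cons.1 h with rfl | hmem
    · rw [List.filter_cons, List.filter_cons]
      simp only [le_refl, decide_true, if_true]
      have hgt : ∀ x ∈ t, i < x := fun x hx => (List.pairwise_cons.1 hp).1 x hx
      have : ¬ (i + 1 ≤ i) := by omega
      simp only [this, decide_false, Bool.false_eq_true, if_false]
      congr 1
      apply List.filter_congr
      intro x hx
      have := hgt x hx
      simp only [decide_eq_decide]
      omega
    · have hai : a < i := (List.pairwise_cons.1 hp).1 i hmem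
      rw [List.filter_cons, List.filter_cons]
      have h1 : ¬ (i ≤ a) := by omega
      have h2 : ¬ (i + 1 ≤ a) := by omega
      simp only [h1, h2, decide_false, Bool.false_eq_true, if_false]
      exact ih (List.pairwise_cons.1 hp).2 hmem


lemma dropWhile_lt_succ_not_mem (j : Int) (l : List Int) (h : j ∉ l) :
    l.dropWhile (fun t => decide (t < j)) = l.dropWhile (fun t => decide (t < j + 1)) := by
  induction l with
  | nil => rfl
  | cons a t ih =>
    have haj : a ≠ j := fun he => h (he ▸ List.mem_cons_self)
    rw [List.dropWhile_cons, List.dropWhile_cons]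
    by_cases hlt : a < j
    · simp only [hlt, (by omega : a < j + 1), decide_true, if_true]
      exact ih (fun hm => h (List.mem_cons_of_mem a hm))
    · rw [if_neg (by simp only [decide_eq_true_eq]; omega), if_neg (by simp only [decide_eq_true_eq]; omega)]

lemma dropWhile_lt_mem_sorted (j : Int) (l : List Int) (hp : l.Pairwise (· < ·)) (h : j ∈ l) :
    ∃ rest, l.dropWhile (fun t => decide (t < j)) = j :: rest := by
  induction l with
  | nil => cases h
  | cons a t ih =>
    rw [List.dropWhile_cons]
    rcases List.mem_cons.1 h with rfl | hmem
    · simp only [lt_irrefl, decide_false, Bool.false_eq_true, if_false]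
      exact ⟨t, rfl⟩
    · have : a < j := (List.pairwise_cons.1 hp).1 j hmem
      simp only [this, decide_true, if_true]
      exact ih (List.pairwise_cons.1 hp).2 hmem

lemma pvFindThief_char (xs : List String) (stop : Int) (hstop : stop ≤ (xs.length : Int)) :
    ∀ (j : Int), 0 ≤ j →
      pvFindThief xs j stop
        = match (pvPosB "L" xs).dropWhile (fun t => decide (t < j)) with
          | [] => none
          | t :: _ => if t < stop then some t else none := by
  suffices H : ∀ (n : Nat) (j : Int), 0 ≤ j → (stop - j).toNat ≤ n →
      pvFindThief xs j stop
        = match (pvPosB "L" xs).dropWhile (fun t => decide (t < j)) with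
          | [] => none
          | t :: _ => if t < stop then some t else none by
    intro j hj; exact H (stop - j).toNat j hj le_rfl
  intro n
  induction n with
  | zero =>
    intro j hj hn
    have hjs : ¬ j < stop := by omega
    rw [pvFindThief]
    simp only [hjs, dif_neg, not_false_iff]
    cases hD : (pvPosB "L" xs).dropWhile (fun t => decide (t < j)) with
    | nil => rfl
    | cons t rest =>
      have := List.head?_dropWhile_not (fun t => decide (t < j)) (pvPosB "L" xs)
      rw [hD] at this
      simp only [List.head?_cons, decide_eq_false_iff_not, not_lt] at this
      simp only [if_neg (by omega : ¬ t < stop)]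
  | succ m ih =>
    intro j hj hn
    rw [pvFindThief]
    by_cases hjs : j < stop
    · rw [dif_pos hjs]
      have hjcast : j = ((j.toNat : Nat) : Int) := by omega
      by_cases hL : PySem.List.pyGetD xs j "" = "L"
      · rw [if_pos hL]
        have hget : xs.getD j.toNat "" = "L" := by
          rw [hjcast, PySem.List.pyGetD_natCast] at hL; exact hL
        have hjlen : j < (xs.length : Int) := by
          by_contra hge
          rw [List.getD_eq_getElem?_getD, List.getElem?_eq_none (by omega : xs.length ≤ j.toNat)] at hget
          simp at hget
        have hmem : j ∈ pvPosB "L" xs := (pvPosB_mem "L" xs j).2 ⟨hj, hjlen, hget⟩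
        obtain ⟨rest, hD⟩ := dropWhile_lt_mem_sorted j _ (pvPosB_pairwise "L" xs) hmem
        rw [hD]
        simp only [if_pos hjs]
      · rw [if_neg hL]
        have hget : xs.getD j.toNat "" ≠ "L" := by
          rw [hjcast, PySem.List.pyGetD_natCast] at hL; exact hL
        have hnmem : j ∉ pvPosB "L" xs := fun hm => hget ((pvPosB_mem "L" xs j).1 hm).2.2
        rw [ih (j + 1) (by omega) (by omega), dropWhile_lt_succ_not_mem j _ hnmem]
    · rw [dif_neg hjs]
      cases hD : (pvPosB "L" xs).dropWhile (fun t => decide (t < j)) with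
      | nil => rfl
      | cons t rest =>
        have := List.head?_dropWhile_not (fun t => decide (t < j)) (pvPosB "L" xs)
        rw [hD] at this
        simp only [List.head?_cons, decide_eq_false_iff_not, not_lt] at this
        simp only [if_neg (by omega : ¬ t < stop)]



lemma pvMain (d : Int) (xs0 : List String) :
    ∀ (k i : Nat) (xs : List String) (c : Int) (pre q : List Int),
      i + k = xs0.length →
      xs.length = xs0.length →
      (∀ m : Nat, (xs.getD m "" = "P") ↔ (xs0.getD m "" = "P")) →
      pvPosB "L" xs = pre ++ q →
      (∀ x ∈ pre, x < (i : Int) - d) →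
      ((PySem.List.pyRange (i : Int) (xs0.length : Int) 1).foldl (pvStepA d (xs0.length : Int)) (c, xs)).1
        = (((pvPosB "P" xs0).filter (fun x => decide ((i : Int) ≤ x))).foldl (pvStepB d) (c, q)).1 := by
  intro k
  induction k with
  | zero =>
    intro i xs c pre q hik hlen hP hLsplit hpre
    rw [PySem.List.pyRange_one_eq_nil (by omega)]
    rw [List.filter_eq_nil_iff.2 (fun x hx => by
      have := (pvPosB_mem "P" xs0 x).1 hx
      simp only [decide_eq_true_eq]; omega)]
    rfl
  | succ m ih =>
    intro i xs c pre q hik hlen hP hLsplit hpre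
    have hilt : (i : Int) < (xs0.length : Int) := by omega
    rw [PySem.List.pyRange_one_cons hilt, List.foldl_cons]
    have hgetA : PySem.List.pyGetD xs (i : Int) "" = xs.getD i "" := by
      rw [PySem.List.pyGetD_natCast]
    by_cases hPi : xs.getD i "" = "P"
    · -- police at i
      have hP0 : xs0.getD i "" = "P" := (hP i).1 hPi
      have hmemP : (i : Int) ∈ pvPosB "P" xs0 :=
        (pvPosB_mem "P" xs0 (i : Int)).2 ⟨by omega, by omega, by simpa using hP0⟩
      rw [filter_le_of_mem _ _ (pvPosB_pairwise "P" xs0) hmemP, List.foldl_cons]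
      -- compute A's step
      have hstop : min ((xs0.length : Int)) ((i : Int) + d + 1) ≤ (xs.length : Int) := by
        rw [hlen]; exact min_le_left _ _
      have hstart : (0 : Int) ≤ max 0 ((i : Int) - d) := le_max_left _ _
      have hchar := pvFindThief_char xs _ hstop _ hstart
      -- the dropWhile over the whole 'L' list equals the dropWhile over q
      have hcongr : (pvPosB "L" xs).dropWhile (fun t => decide (t < max 0 ((i : Int) - d)))
          = (pvPosB "L" xs).dropWhile (fun t => decide (t < (i : Int) - d)) := by
        apply dropWhile_congr_mem
        intro x hx
        have hx0 : 0 ≤ x := ((pvPosB_mem "L" xs x).1 hx).1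
        simp only [decide_eq_decide, lt_max_iff]
        omega
      have hdrop_pre : pre.dropWhile (fun t => decide (t < (i : Int) - d)) = [] :=
        List.dropWhile_eq_nil_iff.2 (fun x hx => by
          simp only [decide_eq_true_eq]; exact hpre x hx)
      have hdropall : (pvPosB "L" xs).dropWhile (fun t => decide (t < (i : Int) - d))
          = q.dropWhile (fun t => decide (t < (i : Int) - d)) := by
        rw [hLsplit, List.dropWhile_append, hdrop_pre]
        simp
      cases hq : q.dropWhile (fun t => decide (t < (i : Int) - d)) with
      | nil =>
        -- no thief available: A does nothing, B empties q
        have hfind : pvFindThief xs (max 0 ((i : Int) - d)) (min ((xs0.length : Int)) ((i : Int) + d + 1)) = none := by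
          rw [hchar, hcongr, hdropall, hq]
        have hstepA : pvStepA d (xs0.length : Int) (c, xs) (i : Int) = (c, xs) := by
          simp only [pvStepA, hgetA, hPi, if_true, hfind]
        have hstepB : pvStepB d (c, q) (i : Int) = (c, []) := by
          simp only [pvStepB, hq]
        rw [hstepA, hstepB]
        have := ih (i + 1) xs c (pre ++ q) [] (by omega) hlen hP (by rw [hLsplit, List.append_nil])
          (fun x hx => by
            rcases List.mem_append.1 hx with h1 | h2
            · have := hpre x h1; push_cast; omega
            · have := List.dropWhile_eq_nil_iff.1 hq x h2
              simp only [decide_eq_true_eq] at this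
              push_cast; omega)
        push_cast at this ⊢
        exact this
      | cons t rest =>
        have htq : t ∈ q := (List.dropWhile_sublist _).subset (hq ▸ List.mem_cons_self)
        have htmem : t ∈ pvPosB "L" xs := hLsplit ▸ List.mem_append.2 (Or.inr htq)
        obtain ⟨ht0, htlen, htL⟩ := (pvPosB_mem "L" xs t).1 htmem
        have hfind : pvFindThief xs (max 0 ((i : Int) - d)) (min ((xs0.length : Int)) ((i : Int) + d + 1))
            = if t < min ((xs0.length : Int)) ((i : Int) + d + 1) then some t else none := by
          rw [hchar, hcongr, hdropall, hq]
        have hiff : (t < min ((xs0.length : Int)) ((i : Int) + d + 1)) ↔ (t ≤ (i : Int) + d) := by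
          rw [lt_min_iff]; omega
        have hsplitq : q = q.takeWhile (fun t => decide (t < (i : Int) - d)) ++ (t :: rest) := by
          conv_lhs => rw [← List.takeWhile_append_dropWhile (p := fun t => decide (t < (i : Int) - d)) (l := q), hq]
        have htake_lt : ∀ x ∈ q.takeWhile (fun t => decide (t < (i : Int) - d)), x < (i : Int) - d := by
          intro x hx
          have := List.mem_takeWhile_imp hx
          simpa using this
        by_cases hcatch : t ≤ (i : Int) + d
        · -- catch: A sets xs[t] := "C", B pops t
          have hfind' : pvFindThief xs (max 0 ((i : Int) - d)) (min ((xs0.length : Int)) ((i : Int) + d + 1)) = some t := by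
            rw [hfind, if_pos (hiff.2 hcatch)]
          have hstepA : pvStepA d (xs0.length : Int) (c, xs) (i : Int)
              = (c + 1, xs.set t.toNat "C") := by
            simp only [pvStepA, hgetA, hPi, if_true, hfind', PySem.List.pySetD_of_nonneg xs "C" ht0]
          have hstepB : pvStepB d (c, q) (i : Int) = (c + 1, rest) := by
            simp only [pvStepB, hq, if_pos hcatch]
          rw [hstepA, hstepB]
          -- new 'L' positions
          have htoNat : ((t.toNat : Nat) : Int) = t := by omega
          have hLnew : pvPosB "L" (xs.set t.toNat "C")
              = (pre ++ q.takeWhile (fun t => decide (t < (i : Int) - d))) ++ rest := by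
            rw [pvPosB_set_L xs t.toNat (by omega) htL]
            · rw [htoNat]
              have hsplit : pvPosB "L" xs
                  = (pre ++ q.takeWhile (fun t => decide (t < (i : Int) - d))) ++ t :: rest := by
                rw [hLsplit]
                conv_lhs => rw [hsplitq]
                rw [List.append_assoc]
              have hnd : (pvPosB "L" xs).Nodup :=
                (pvPosB_pairwise "L" xs).imp (fun h => ne_of_lt h)
              exact filter_ne_of_split hsplit hnd
          have hPpres : ∀ n : Nat, ((xs.set t.toNat "C").getD n "" = "P") ↔ (xs0.getD n "" = "P") := by
            intro n
            by_cases hn : n = t.toNat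
            · have h1 : (xs.set t.toNat "C").getD t.toNat "" = "C" := by
                simp [List.getD_eq_getElem?_getD, List.getElem?_set_self, (show t.toNat < xs.length by omega)]
              rw [hn, h1, ← hP t.toNat, htL]
              constructor <;> intro h <;> exact absurd h (by decide)
            · have : (xs.set t.toNat "C").getD n "" = xs.getD n "" := by
                simp [List.getD_eq_getElem?_getD, List.getElem?_set_ne (by omega : t.toNat ≠ n)]
              rw [this]; exact hP n
          have := ih (i + 1) (xs.set t.toNat "C") (c + 1)
            (pre ++ q.takeWhile (fun t => decide (t < (i : Int) - d))) rest
            (by omega) (by rw [List.length_set]; exact hlen) hPpres hLnew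
            (fun x hx => by
              rcases List.mem_append.1 hx with h1 | h2
              · have := hpre x h1; push_cast; omega
              · have := htake_lt x h2; push_cast; omega)
          push_cast at this ⊢
          exact this
        · -- no catch: A does nothing, B keeps t :: rest
          have hfind' : pvFindThief xs (max 0 ((i : Int) - d)) (min ((xs0.length : Int)) ((i : Int) + d + 1)) = none := by
            rw [hfind, if_neg (fun h => hcatch (hiff.1 h))]
          have hstepA : pvStepA d (xs0.length : Int) (c, xs) (i : Int) = (c, xs) := by
            simp only [pvStepA, hgetA, hPi, if_true, hfind']
          have hstepB : pvStepB d (c, q) (i : Int) = (c, t :: rest) := by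
            simp only [pvStepB, hq, if_neg hcatch]
          rw [hstepA, hstepB]
          have := ih (i + 1) xs c
            (pre ++ q.takeWhile (fun t => decide (t < (i : Int) - d))) (t :: rest)
            (by omega) hlen hP
            (by rw [hLsplit]; conv_lhs => rw [hsplitq]
                rw [List.append_assoc])
            (fun x hx => by
              rcases List.mem_append.1 hx with h1 | h2
              · have := hpre x h1; push_cast; omega
              · have := htake_lt x h2; push_cast; omega)
          push_cast at this ⊢
          exact this
    · -- no police at i
      have hstepA : pvStepA d (xs0.length : Int) (c, xs) (i : Int) = (c, xs) := by
        simp only [pvStepA, hgetA, hPi, if_false]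
      have hnmem : (i : Int) ∉ pvPosB "P" xs0 := fun hm => by
        have := (pvPosB_mem "P" xs0 (i : Int)).1 hm
        have : xs0.getD i "" = "P" := by simpa using this.2.2
        exact hPi ((hP i).2 this)
      rw [hstepA, filter_le_of_not_mem _ _ hnmem]
      have := ih (i + 1) xs c pre q (by omega) hlen hP hLsplit
        (fun x hx => by have := hpre x hx; push_cast; omega)
      push_cast at this ⊢
      exact this

-- ===== VERDICT (by name: the statement is the Claim_ definition above) =====
theorem max_thieves_captured_spec : Claim_equal_max_thieves_captured := by
  intro d xs _
  show _ = _
  unfold max_thieves_captured max_thieves_captured_alt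
  have h := pvMain d xs xs.length 0 xs 0 [] (pvPosB "L" xs) (by omega) rfl
    (fun m => Iff.rfl) (by simp) (by simp)
  simp only [Nat.cast_zero] at h
  rw [h]
  congr 1
  congr 1
  rw [List.filter_eq_self.2]
  intro x hx
  have := (pvPosB_mem "P" xs x).1 hx
  simp only [decide_eq_true_eq]
  omega
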